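-- pv_equiv track=rewrite | github.com/Choudharysid31/GeeksForGeeks-Solutions | Substrings-Of-Length-k-With-(k-1)-Distinct-Elements.py | substrCount
-- ===== SOURCE A (Python) =====
-- def substrCount(s, k):
--     count=0
--     left=0
--     right=1
--     checker={s[0]:1}
--
--     while right<len(s):
--         checker[s[right]]=checker.get(s[right],0)+1
--
--         if len(checker)>(k-1):
--             checker[s[left]]-=1
--             if checker[s[left]]==0:
--                 del(checker[s[left]])
--             left+=1
--         if (right-left+1)>k:
--             checker[s[left]]-=1
--             if checker[s[left]]==0:
--                 del(checker[s[left]])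
--             left+=1
--
--         if len(checker)==k-1 and (right-left+1)==k:
--             count+=1
--
--         right+=1
--     return count
-- ===== SOURCE B (Python) =====
-- def substrCount(s, k):
--     if k - 1 < 0:
--         return 0  # no window can have k-1 distinct characters when k - 1 < 0
--     count = 0
--     for i in range(len(s) - k + 1):
--         if len(set(s[i:i+k])) == k - 1:
--             count += 1
--     return count
-- ===== Notes on version B (the rewrite author's own statement) =====
-- stated objective: simpler
-- what changed: Replaces A's incremental sliding-window frequency dict (two shrink branches, manual count/delete bookkeeping) with a plain per-window recount: for each start i, count the distinct characters of s[i:i+k] with len(set(...)).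
import Mathlib
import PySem

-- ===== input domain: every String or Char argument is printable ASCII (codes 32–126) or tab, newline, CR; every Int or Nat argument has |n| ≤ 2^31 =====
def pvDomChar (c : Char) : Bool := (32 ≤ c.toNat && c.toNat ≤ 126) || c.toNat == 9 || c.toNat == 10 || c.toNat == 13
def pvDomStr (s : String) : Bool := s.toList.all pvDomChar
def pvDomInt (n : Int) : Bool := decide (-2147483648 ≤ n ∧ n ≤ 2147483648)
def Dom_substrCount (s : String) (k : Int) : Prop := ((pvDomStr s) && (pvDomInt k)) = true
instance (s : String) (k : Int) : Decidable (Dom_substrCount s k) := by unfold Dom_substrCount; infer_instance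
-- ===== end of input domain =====

-- B replaces A's incremental sliding-window frequency dict with a plain per-window distinct recount (simpler, not faster).
-- ===== PORT A =====
-- checker[s[left]] -= 1; if checker[s[left]] == 0: del checker[s[left]]
-- (on Pre_ the key is always present, so the KeyError branch of '-=' is unreachable; getD is exact there)
def substrCountShrink (checker : PySem.Dict Char Int) (cl : Char) : PySem.Dict Char Int :=
  let checker := checker.insert cl (checker.getD cl 0 - 1)
  if checker.getD cl 0 = 0 then checker.erase cl else checker

def substrCountLoop (cs : List Char) (k : Int) (count left : Int)
    (checker : PySem.Dict Char Int) (right : Nat) : Int :=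
  if h : right < cs.length then
    let cr := cs.getD right ' '                                   -- s[right] (in range: loop guard)
    let checker1 := checker.insert cr (checker.getD cr 0 + 1)
    let p1 := if ((checker1.size : Int)) > k - 1 then
        (substrCountShrink checker1 ((PySem.List.pyGet? cs left).getD ' '), left + 1)
      else (checker1, left)
    let p2 := if ((right : Int) - p1.2 + 1) > k then
        (substrCountShrink p1.1 ((PySem.List.pyGet? cs p1.2).getD ' '), p1.2 + 1)
      else p1
    let count1 := if ((p2.1.size : Int)) = k - 1 ∧ ((right : Int) - p2.2 + 1) = k then count + 1 else count
    substrCountLoop cs k count1 p2.2 p2.1 (right + 1)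
  else count
termination_by cs.length - right
decreasing_by omega

def substrCount (s : String) (k : Int) : Int :=
  match s.toList with
  | [] => 0                                                       -- Python raises IndexError on s[0] (outside Pre_)
  | c0 :: _ => substrCountLoop s.toList k 0 0 (PySem.Dict.empty.insert c0 1) 1

-- ===== PORT B =====
def substrCount_alt (s : String) (k : Int) : Int :=
  if k - 1 < 0 then 0 else  -- no window can have k-1 distinct characters when k-1 < 0
  let cs := s.toList
  (PySem.List.pyRange 0 ((cs.length : Int) - k + 1)).foldl
    (fun count i =>
      if (((PySem.Set.ofList (PySem.List.slice cs (some i) (some (i + k)))).length : Int)) = k - 1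
      then count + 1 else count) 0

-- ===== PRECONDITION & SPEC =====
-- Pre_ excludes exactly the inputs on which A raises: empty s (IndexError on s[0]) and negative k
-- with len(s) >= 3 (KeyError/IndexError while over-shrinking the window).
def Pre_substrCount (s : String) (k : Int) : Prop := s ≠ "" ∧ (0 ≤ k ∨ (s.toList.length : Int) ≤ 2)
instance (s : String) (k : Int) : Decidable (Pre_substrCount s k) := by unfold Pre_substrCount; infer_instance
def pvWitness_substrCount : String × Int := ("aba", 2)

def Spec_substrCount (s : String) (k : Int) (out : Int) : Prop := out = substrCount_alt s k
instance (s : String) (k : Int) (out : Int) : Decidable (Spec_substrCount s k out) := by unfold Spec_substrCount; infer_instance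

-- ===== CLAIM (what is proved, stated in full; the proofs are below) =====
def Claim_equal_substrCount : Prop := ∀ (s : String) (k : Int), Dom_substrCount s k → Pre_substrCount s k → Spec_substrCount s k (substrCount s k)
-- ===== LEMMAS AND PROOFS =====

-- distinct-character count of a window (what B's len(set(...)) computes)
def dct (l : List Char) : Nat := (PySem.Set.ofList l).length
-- the window s[i:j]
def win (cs : List Char) (i j : Nat) : List Char := (cs.drop i).take (j - i)
-- B counts start index i iff the k-window at i has exactly k-1 distinct characters
def goodW (cs : List Char) (k : Int) (i : Nat) : Bool :=
  decide (((dct ((cs.drop i).take k.toNat)) : Int) = k - 1)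

-- number of good start indices i with r+1-k <= i <= n-k (the windows A has not yet checked at loop top r)
def remA (cs : List Char) (k : Int) (r : Nat) : Nat :=
  (List.range' (r + 1 - k.toNat) ((cs.length + 1 - k.toNat) - (r + 1 - k.toNat))).countP
    (fun i => goodW cs k i)

-- the dict invariant: checker is exactly the multiset of characters of the window s[i:j]
def dictInv (d : PySem.Dict Char Int) (cs : List Char) (i j : Nat) : Prop :=
  d.keys.Nodup ∧ (∀ c, d.getD c 0 = ((win cs i j).count c : Int)) ∧
  (∀ c, d.contains c = true ↔ c ∈ win cs i j)

-- A's full loop invariant at loop top r with window start l0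
def invA (cs : List Char) (k : Int) (r l0 : Nat) (d : PySem.Dict Char Int) : Prop :=
  l0 ≤ r ∧ (r : Int) - l0 ≤ k ∧ dictInv d cs l0 r ∧
  (∀ j : Nat, j < l0 → (k < (r : Int) - j ∨ k ≤ (dct (win cs j r) : Int)))

-- ---- generic list/set facts ----
lemma dct_append_singleton (l : List Char) (c : Char) :
    dct (l ++ [c]) = dct l + (if c ∈ l then 0 else 1) := by
  unfold dct
  rw [PySem.Set.ofList_eq_foldl, List.foldl_append, ← PySem.Set.ofList_eq_foldl]
  show (PySem.Set.add (PySem.Set.ofList l) c).length = _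
  unfold PySem.Set.add
  by_cases hc : c ∈ l
  · have : (PySem.Set.ofList l).contains c = true := by
      unfold PySem.Set.contains
      simpa [List.contains_iff_mem, PySem.Set.mem_ofList] using hc
    simp [hc]
  · have : (PySem.Set.ofList l).contains c = false := by
      unfold PySem.Set.contains
      simpa [List.contains_iff_mem, PySem.Set.mem_ofList] using hc
    simp [hc]

lemma dct_le_append_singleton (l : List Char) (c : Char) : dct l ≤ dct (l ++ [c]) := by
  rw [dct_append_singleton]; split <;> omega

lemma nodup_length_eq (xs ys : List Char) (hx : xs.Nodup) (hy : ys.Nodup)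
    (h : ∀ a, a ∈ xs ↔ a ∈ ys) : xs.length = ys.length := by
  have hfin : xs.toFinset = ys.toFinset := by
    ext a; simp [List.mem_toFinset, h a]
  have h1 := List.toFinset_card_of_nodup hx
  have h2 := List.toFinset_card_of_nodup hy
  rw [← h1, ← h2, hfin]

-- ---- erase facts (PySem.Dict.erase has no library lemmas) ----
lemma find?_filter_ne (items : List (Char × Int)) (c c' : Char) :
    (items.filter (fun p => !(p.1 == c))).find? (fun p => p.1 == c') =
      if c' = c then none else items.find? (fun p => p.1 == c') := by
  induction items with
  | nil => simp
  | cons p t ih =>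
    rw [List.filter_cons]
    by_cases hpc : p.1 = c
    · rw [if_neg (by simp [hpc]), ih]
      by_cases hcc : c' = c
      · simp [hcc]
      · rw [if_neg hcc, if_neg hcc,
          List.find?_cons_of_neg (by simp [hpc]; exact fun h => hcc (h ▸ rfl))]
    · rw [if_pos (by simp [hpc])]
      by_cases hpc' : p.1 = c'
      · have hcc : ¬ c' = c := fun h => hpc (by rw [hpc', h])
        rw [List.find?_cons_of_pos (by simp [hpc']), if_neg hcc,
          List.find?_cons_of_pos (by simp [hpc'])]
      · rw [List.find?_cons_of_neg (by simp [hpc']), ih]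
        by_cases hcc : c' = c
        · simp [hcc]
        · rw [if_neg hcc, if_neg hcc, List.find?_cons_of_neg (by simp [hpc'])]

lemma get?_erase (d : PySem.Dict Char Int) (c c' : Char) :
    (d.erase c).get? c' = if c' = c then none else d.get? c' := by
  show ((d.items.filter (fun p => !(p.1 == c))).find? (fun p => p.1 == c')).map (·.2) = _
  rw [find?_filter_ne]
  split <;> rfl

lemma contains_erase (d : PySem.Dict Char Int) (c c' : Char) :
    (d.erase c).contains c' = if c' = c then false else d.contains c' := by
  show (d.items.filter (fun p => !(p.1 == c))).any (fun p => p.1 == c') = _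
  rw [List.any_filter]
  by_cases hcc : c' = c
  · subst hcc
    rw [if_pos rfl]
    simp
  · rw [if_neg hcc]
    have : (fun p : Char × Int => !(p.1 == c) && (p.1 == c')) = (fun p : Char × Int => p.1 == c') := by
      funext p
      by_cases hp : p.1 = c'
      · simp [hp, hcc]
      · simp [hp]
    rw [this]
    rfl

lemma nodup_keys_erase (d : PySem.Dict Char Int) (c : Char) (h : d.keys.Nodup) :
    (d.erase c).keys.Nodup := by
  have hsub : (d.erase c).keys.Sublist d.keys :=
    List.Sublist.map _ (List.filter_sublist)
  exact hsub.nodup h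

-- ---- window facts ----
lemma win_cons (cs : List Char) (i j : Nat) (hij : i < j) (hin : i < cs.length) :
    win cs i j = cs[i] :: win cs (i+1) j := by
  unfold win
  rw [List.drop_eq_getElem_cons hin]
  obtain ⟨m, hm⟩ : ∃ m, j - i = m + 1 := ⟨j - i - 1, by omega⟩
  rw [hm, List.take_succ_cons, show j - (i+1) = m from by omega]

lemma win_snoc (cs : List Char) (i r : Nat) (hir : i ≤ r) (hrn : r < cs.length) :
    win cs i (r+1) = win cs i r ++ [cs[r]] := by
  unfold win
  rw [show r + 1 - i = (r - i) + 1 from by omega, List.take_add_one]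
  congr 1
  rw [List.getElem?_drop, show i + (r - i) = r from by omega,
    List.getElem?_eq_getElem hrn]
  rfl

-- ---- dict invariant steps ----
lemma size_eq_dct (d : PySem.Dict Char Int) (cs : List Char) (i j : Nat)
    (h : dictInv d cs i j) : d.size = dct (win cs i j) := by
  obtain ⟨hnd, _, hmem⟩ := h
  show d.items.length = (PySem.Set.ofList (win cs i j)).length
  have : d.keys.length = (PySem.Set.ofList (win cs i j)).length := by
    apply nodup_length_eq _ _ hnd (PySem.Set.nodup_ofList _)
    intro a
    rw [PySem.Set.mem_ofList, ← hmem a, PySem.Dict.contains_iff_mem_keys]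
  simpa [PySem.Dict.keys, List.length_map] using this

lemma insert_spec (d : PySem.Dict Char Int) (cs : List Char) (i r : Nat)
    (hir : i ≤ r) (hrn : r < cs.length) (h : dictInv d cs i r) :
    dictInv (d.insert cs[r] (d.getD cs[r] 0 + 1)) cs i (r+1) := by
  obtain ⟨hnd, hcnt, hmem⟩ := h
  rw [dictInv, win_snoc cs i r hir hrn]
  refine ⟨PySem.Dict.nodup_keys_insert _ _ _ hnd, ?_, ?_⟩
  · intro c
    rw [PySem.Dict.getD_insert, List.count_append, List.count_singleton]
    by_cases hc : c = cs[r]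
    · rw [if_pos hc, hcnt, hc, if_pos (by simp)]
      push_cast; ring
    · rw [if_neg hc, hcnt, if_neg (by simp; exact fun hh => hc hh.symm)]
      push_cast; ring
  · intro c
    rw [PySem.Dict.contains_insert]
    by_cases hc : c = cs[r]
    · simp [hc]
    · simp only [List.mem_append, List.mem_singleton]
      simp [hc, hmem c]

lemma shrink_spec (d : PySem.Dict Char Int) (cs : List Char) (i ρ : Nat)
    (hiρ : i < ρ) (hin : i < cs.length) (h : dictInv d cs i ρ) :
    dictInv (substrCountShrink d ((PySem.List.pyGet? cs (i : Int)).getD ' ')) cs (i+1) ρ := by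
  obtain ⟨hnd, hcnt, hmem⟩ := h
  have hcl : (PySem.List.pyGet? cs (i : Int)).getD ' ' = cs[i] := by
    rw [PySem.List.pyGet?_natCast, List.getElem?_eq_getElem hin]
    rfl
  have hWc : win cs i ρ = cs[i] :: win cs (i+1) ρ := win_cons cs i ρ hiρ hin
  have hdcl : d.getD cs[i] 0 = ((win cs (i+1) ρ).count cs[i] : Int) + 1 := by
    rw [hcnt, hWc, List.count_cons, if_pos (by simp)]
    push_cast; ring
  unfold substrCountShrink
  rw [hcl]
  show dictInv (if (d.insert cs[i] (d.getD cs[i] 0 - 1)).getD cs[i] 0 = 0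
      then (d.insert cs[i] (d.getD cs[i] 0 - 1)).erase cs[i] else d.insert cs[i] (d.getD cs[i] 0 - 1)) cs (i + 1) ρ
  have hins : (d.insert cs[i] (d.getD cs[i] 0 - 1)).getD cs[i] 0 = ((win cs (i+1) ρ).count cs[i] : Int) := by
    rw [PySem.Dict.getD_insert, if_pos rfl, hdcl]; ring
  by_cases hz : (d.insert cs[i] (d.getD cs[i] 0 - 1)).getD cs[i] 0 = 0
  · rw [if_pos hz]
    have hcnt0 : (win cs (i+1) ρ).count cs[i] = 0 := by
      rw [hins] at hz; exact_mod_cast hz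
    have hclnot : cs[i] ∉ win cs (i+1) ρ := List.count_eq_zero.mp hcnt0
    refine ⟨nodup_keys_erase _ _ (PySem.Dict.nodup_keys_insert _ _ _ hnd), ?_, ?_⟩
    · intro c
      rw [PySem.Dict.getD_eq_get?_getD, get?_erase]
      by_cases hc : c = cs[i]
      · rw [if_pos hc, hc, hcnt0]
        rfl
      · rw [if_neg hc, ← PySem.Dict.getD_eq_get?_getD, PySem.Dict.getD_insert,
          if_neg hc, hcnt, hWc, List.count_cons, if_neg (by simp; exact fun hh => hc hh.symm)]
        push_cast; ring
    · intro c
      rw [contains_erase]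
      by_cases hc : c = cs[i]
      · rw [if_pos hc, hc]
        simp [hclnot]
      · rw [if_neg hc, PySem.Dict.contains_insert]
        have hb : (c == cs[i]) = false := by simp [hc]
        rw [hb]
        simp only [Bool.false_or]
        rw [hmem c, hWc]
        simp [hc]
  · rw [if_neg hz]
    have hclpos : 0 < (win cs (i+1) ρ).count cs[i] := by
      rcases Nat.eq_zero_or_pos ((win cs (i+1) ρ).count cs[i]) with h0 | h0
      · exact absurd (by rw [hins, h0]; rfl) hz
      · exact h0
    have hclmem : cs[i] ∈ win cs (i+1) ρ := List.count_pos_iff.mp hclpos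
    refine ⟨PySem.Dict.nodup_keys_insert _ _ _ hnd, ?_, ?_⟩
    · intro c
      rw [PySem.Dict.getD_insert]
      by_cases hc : c = cs[i]
      · rw [if_pos hc, hc, hdcl]; ring
      · rw [if_neg hc, hcnt, hWc, List.count_cons, if_neg (by simp; exact fun hh => hc hh.symm)]
        push_cast; ring
    · intro c
      rw [PySem.Dict.contains_insert]
      by_cases hc : c = cs[i]
      · simp [hc, hclmem]
      · have hb : (c == cs[i]) = false := by simp [hc]
        rw [hb]
        simp only [Bool.false_or]
        rw [hmem c, hWc]
        simp [hc]

-- ---- the remaining-count recurrence ----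
lemma remA_succ (cs : List Char) (k : Int) (r : Nat) (hk : 1 ≤ k) (hr : r < cs.length) :
    (remA cs k r : Int) = (if k ≤ (r : Int) + 1 ∧ goodW cs k (r + 1 - k.toNat) = true then 1 else 0)
      + (remA cs k (r+1) : Int) := by
  unfold remA
  by_cases hkr : k.toNat ≤ r + 1
  · have hlt : r + 1 - k.toNat < cs.length + 1 - k.toNat := by omega
    rw [show (cs.length + 1 - k.toNat) - (r + 1 - k.toNat)
        = ((cs.length + 1 - k.toNat) - (r + 2 - k.toNat)) + 1 from by omega,
      List.range'_succ, List.countP_cons,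
      show r + 1 - k.toNat + 1 = r + 1 + 1 - k.toNat from by omega]
    have hcond : (k ≤ (r : Int) + 1 ∧ goodW cs k (r + 1 - k.toNat) = true) ↔ goodW cs k (r + 1 - k.toNat) = true := by
      constructor
      · exact fun h => h.2
      · exact fun h => ⟨by omega, h⟩
    by_cases hg : goodW cs k (r + 1 - k.toNat) = true
    · rw [if_pos (hcond.mpr hg), if_pos (by simpa using hg)]
      push_cast; ring
    · rw [if_neg (fun hh => hg (hcond.mp hh)), if_neg (by simpa using hg)]
      push_cast; ring
  · rw [show r + 1 - k.toNat = 0 from by omega, show r + 1 + 1 - k.toNat = 0 from by omega,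
      if_neg (fun hh => absurd hh.1 (by omega))]
    ring

lemma remA_last (cs : List Char) (k : Int) (r : Nat) (hr : cs.length ≤ r) : remA cs k r = 0 := by
  unfold remA
  rw [show (cs.length + 1 - k.toNat) - (r + 1 - k.toNat) = 0 from by omega]
  rfl

-- ---- the main loop lemmas ----
-- ---- helpers for the main induction ----
lemma goodW_win (cs : List Char) (k : Int) (i r : Nat) (hk : 1 ≤ k) (hi : (i : Int) + k = (r : Int) + 1) :
    goodW cs k i = true ↔ ((dct (win cs i (r+1)) : Int) = k - 1) := by
  unfold goodW win
  rw [show r + 1 - i = k.toNat from by omega]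
  exact decide_eq_true_iff

lemma past_step (cs : List Char) (k : Int) (r l0 : Nat) (hrn : r < cs.length) (hl0r : l0 ≤ r)
    (hpast : ∀ j : Nat, j < l0 → (k < (r : Int) - j ∨ k ≤ (dct (win cs j r) : Int))) :
    ∀ j : Nat, j < l0 → (k < ((r+1 : Nat) : Int) - j ∨ k ≤ (dct (win cs j (r+1)) : Int)) := by
  intro j hj
  rcases hpast j hj with h | h
  · left; push_cast; omega
  · right
    have hmono := dct_le_append_singleton (win cs j r) cs[r]
    rw [← win_snoc cs j r (by omega) hrn] at hmono
    omega

lemma l0_le_istar (cs : List Char) (k : Int) (r l0 : Nat) (hk : 1 ≤ k) (hkr : k ≤ (r : Int) + 1)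
    (hl0r : l0 ≤ r) (hrn : r < cs.length)
    (hpast : ∀ j : Nat, j < l0 → (k < (r : Int) - j ∨ k ≤ (dct (win cs j r) : Int)))
    (hgood : goodW cs k (r+1-k.toNat) = true) : l0 ≤ r + 1 - k.toNat := by
  by_contra hcon
  rcases hpast (r+1-k.toNat) (by omega) with hj | hj
  · omega
  · have hgg := (goodW_win cs k (r+1-k.toNat) r hk (by omega)).mp hgood
    have hmono := dct_le_append_singleton (win cs (r+1-k.toNat) r) cs[r]
    rw [← win_snoc cs (r+1-k.toNat) r (by omega) hrn] at hmono
    omega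

lemma dictInv_init (c0 : Char) (rest : List Char) :
    dictInv (PySem.Dict.empty.insert c0 1) (c0 :: rest) 0 1 := by
  have hwin : win (c0 :: rest) 0 1 = [c0] := rfl
  refine ⟨PySem.Dict.nodup_keys_insert _ _ _ PySem.Dict.nodup_keys_empty, ?_, ?_⟩
  · intro c
    rw [hwin, PySem.Dict.getD_insert]
    by_cases hc : c = c0
    · simp [hc]
    · rw [if_neg hc, PySem.Dict.getD_empty, List.count_singleton,
        if_neg (by simp; exact fun hh => hc hh.symm)]
      rfl
  · intro c
    rw [hwin, PySem.Dict.contains_insert, PySem.Dict.contains_empty]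
    by_cases hc : c = c0 <;> simp [hc]

lemma loopA (cs : List Char) (k : Int) (hk : 1 ≤ k) :
    ∀ r l0 count checker, 1 ≤ r → invA cs k r l0 checker →
      substrCountLoop cs k count (l0 : Int) checker r = count + (remA cs k r : Int) := by
  have main : ∀ fuel r l0 count checker, cs.length - r ≤ fuel → 1 ≤ r → invA cs k r l0 checker →
      substrCountLoop cs k count (l0 : Int) checker r = count + (remA cs k r : Int) := by
    intro fuel
    induction fuel with
    | zero =>
      intro r l0 count checker hf hr hinv
      rw [substrCountLoop, dif_neg (by omega), remA_last cs k r (by omega)]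
      simp
    | succ fuel ih =>
      intro r l0 count checker hf hr hinv
      obtain ⟨hl0r, hlen, hdict, hpast⟩ := hinv
      by_cases hrn : r < cs.length
      · rw [substrCountLoop, dif_pos hrn]
        dsimp only
        rw [List.getD_eq_getElem cs ' ' hrn]
        have hd1 : dictInv (checker.insert cs[r] (checker.getD cs[r] 0 + 1)) cs l0 (r+1) :=
          insert_spec checker cs l0 r hl0r hrn hdict
        have hsz1 : ((checker.insert cs[r] (checker.getD cs[r] 0 + 1)).size : Int)
            = (dct (win cs l0 (r+1)) : Int) := by
          exact_mod_cast size_eq_dct _ cs l0 (r+1) hd1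
        by_cases hb1 : ((checker.insert cs[r] (checker.getD cs[r] 0 + 1)).size : Int) > k - 1
        · rw [if_pos hb1]
          dsimp only
          have hd2 : dictInv (substrCountShrink (checker.insert cs[r] (checker.getD cs[r] 0 + 1))
              ((PySem.List.pyGet? cs ((l0 : Nat) : Int)).getD ' ')) cs (l0+1) (r+1) :=
            shrink_spec _ cs l0 (r+1) (by omega) (by omega) hd1
          rw [if_neg (show ¬ ((r : Int) - ((l0 : Int) + 1) + 1 > k) from by omega)]
          dsimp only
          have hsz2 : ((substrCountShrink (checker.insert cs[r] (checker.getD cs[r] 0 + 1))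
              ((PySem.List.pyGet? cs ((l0 : Nat) : Int)).getD ' ')).size : Int)
              = (dct (win cs (l0+1) (r+1)) : Int) := by
            exact_mod_cast size_eq_dct _ cs (l0+1) (r+1) hd2
          have hinv' : invA cs k (r+1) (l0+1) (substrCountShrink
              (checker.insert cs[r] (checker.getD cs[r] 0 + 1))
              ((PySem.List.pyGet? cs ((l0 : Nat) : Int)).getD ' ')) := by
            refine ⟨by omega, by push_cast; omega, hd2, ?_⟩
            intro j hj
            rcases Nat.lt_or_ge j l0 with hjl | hjl
            · exact past_step cs k r l0 hrn hl0r hpast j hjl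
            · have hje : j = l0 := by omega
              right
              rw [hje]
              omega
          rw [show ((l0 : Int) + 1) = (((l0+1 : Nat)) : Int) from by push_cast; ring]
          rw [ih (r+1) (l0+1) _ _ (by omega) (by omega) hinv']
          rw [remA_succ cs k r hk hrn]
          have hiff : (((substrCountShrink (checker.insert cs[r] (checker.getD cs[r] 0 + 1))
                ((PySem.List.pyGet? cs ((l0 : Nat) : Int)).getD ' ')).size : Int) = k - 1
                ∧ (r : Int) - (((l0+1 : Nat)) : Int) + 1 = k)
              ↔ (k ≤ (r : Int) + 1 ∧ goodW cs k (r + 1 - k.toNat) = true) := by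
            constructor
            · rintro ⟨h1, h2⟩
              push_cast at h2
              refine ⟨by omega, ?_⟩
              rw [show r + 1 - k.toNat = l0 + 1 from by omega]
              exact (goodW_win cs k (l0+1) r hk (by push_cast; omega)).mpr (by rw [← hsz2]; exact h1)
            · rintro ⟨hkr, hgood⟩
              have hle := l0_le_istar cs k r l0 hk hkr hl0r hrn hpast hgood
              have hno : ¬ ((l0 : Int) = (r : Int) + 1 - k) := by
                intro heq
                rw [show r + 1 - k.toNat = l0 from by omega] at hgood
                have hgw := (goodW_win cs k l0 r hk (by omega)).mp hgood
                omega
              have h2 : (r : Int) - (((l0+1 : Nat)) : Int) + 1 = k := by push_cast; omega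
              refine ⟨?_, h2⟩
              push_cast at h2
              rw [hsz2]
              rw [show r + 1 - k.toNat = l0 + 1 from by omega] at hgood
              exact (goodW_win cs k (l0+1) r hk (by push_cast; omega)).mp hgood
          split_ifs with hC hG hG'
          · ring
          · exact absurd (hiff.mp hC) hG
          · exact absurd (hiff.mpr hG') hC
          · ring
        · rw [if_neg hb1]
          dsimp only
          by_cases hb2 : ((r : Int) - ((l0 : Nat) : Int) + 1 > k)
          · rw [if_pos hb2]
            dsimp only
            have hd2 : dictInv (substrCountShrink (checker.insert cs[r] (checker.getD cs[r] 0 + 1))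
                ((PySem.List.pyGet? cs ((l0 : Nat) : Int)).getD ' ')) cs (l0+1) (r+1) :=
              shrink_spec _ cs l0 (r+1) (by omega) (by omega) hd1
            have hsz2 : ((substrCountShrink (checker.insert cs[r] (checker.getD cs[r] 0 + 1))
                ((PySem.List.pyGet? cs ((l0 : Nat) : Int)).getD ' ')).size : Int)
                = (dct (win cs (l0+1) (r+1)) : Int) := by
              exact_mod_cast size_eq_dct _ cs (l0+1) (r+1) hd2
            have hrl0 : (r : Int) - l0 = k := by omega
            have hinv' : invA cs k (r+1) (l0+1) (substrCountShrink
                (checker.insert cs[r] (checker.getD cs[r] 0 + 1))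
                ((PySem.List.pyGet? cs ((l0 : Nat) : Int)).getD ' ')) := by
              refine ⟨by omega, by push_cast; omega, hd2, ?_⟩
              intro j hj
              rcases Nat.lt_or_ge j l0 with hjl | hjl
              · exact past_step cs k r l0 hrn hl0r hpast j hjl
              · left
                have hje : j = l0 := by omega
                rw [hje]
                push_cast
                omega
            rw [show ((l0 : Int) + 1) = (((l0+1 : Nat)) : Int) from by push_cast; ring]
            rw [ih (r+1) (l0+1) _ _ (by omega) (by omega) hinv']
            rw [remA_succ cs k r hk hrn]
            have hiff : (((substrCountShrink (checker.insert cs[r] (checker.getD cs[r] 0 + 1))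
                  ((PySem.List.pyGet? cs ((l0 : Nat) : Int)).getD ' ')).size : Int) = k - 1
                  ∧ (r : Int) - (((l0+1 : Nat)) : Int) + 1 = k)
                ↔ (k ≤ (r : Int) + 1 ∧ goodW cs k (r + 1 - k.toNat) = true) := by
              constructor
              · rintro ⟨h1, _⟩
                refine ⟨by omega, ?_⟩
                rw [show r + 1 - k.toNat = l0 + 1 from by omega]
                exact (goodW_win cs k (l0+1) r hk (by push_cast; omega)).mpr (by rw [← hsz2]; exact h1)
              · rintro ⟨hkr, hgood⟩
                refine ⟨?_, by push_cast; omega⟩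
                rw [hsz2]
                rw [show r + 1 - k.toNat = l0 + 1 from by omega] at hgood
                exact (goodW_win cs k (l0+1) r hk (by push_cast; omega)).mp hgood
            split_ifs with hC hG hG'
            · ring
            · exact absurd (hiff.mp hC) hG
            · exact absurd (hiff.mpr hG') hC
            · ring
          · rw [if_neg hb2]
            dsimp only
            have hinv' : invA cs k (r+1) l0 (checker.insert cs[r] (checker.getD cs[r] 0 + 1)) := by
              refine ⟨by omega, by push_cast; omega, hd1, ?_⟩
              intro j hj
              exact past_step cs k r l0 hrn hl0r hpast j hj
            rw [ih (r+1) l0 _ _ (by omega) (by omega) hinv']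
            rw [remA_succ cs k r hk hrn]
            have hiff : (((checker.insert cs[r] (checker.getD cs[r] 0 + 1)).size : Int) = k - 1
                  ∧ (r : Int) - ((l0 : Nat) : Int) + 1 = k)
                ↔ (k ≤ (r : Int) + 1 ∧ goodW cs k (r + 1 - k.toNat) = true) := by
              constructor
              · rintro ⟨h1, h2⟩
                refine ⟨by omega, ?_⟩
                rw [show r + 1 - k.toNat = l0 from by omega]
                exact (goodW_win cs k l0 r hk (by omega)).mpr (by rw [← hsz1]; exact h1)
              · rintro ⟨hkr, hgood⟩
                have hle := l0_le_istar cs k r l0 hk hkr hl0r hrn hpast hgood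
                have h2 : (r : Int) - ((l0 : Nat) : Int) + 1 = k := by omega
                refine ⟨?_, h2⟩
                rw [hsz1]
                rw [show r + 1 - k.toNat = l0 from by omega] at hgood
                exact (goodW_win cs k l0 r hk (by omega)).mp hgood
            split_ifs with hC hG hG'
            · ring
            · exact absurd (hiff.mp hC) hG
            · exact absurd (hiff.mpr hG') hC
            · ring
      · rw [substrCountLoop, dif_neg hrn, remA_last cs k r (by omega)]
        simp
  exact fun r l0 count checker hr hinv => main cs.length r l0 count checker (by omega) hr hinv

lemma loopK0 (cs : List Char) :
    ∀ r l0 count checker, 1 ≤ r → l0 ≤ r → r ≤ l0 + 1 → dictInv checker cs l0 r →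
      substrCountLoop cs 0 count (l0 : Int) checker r = count := by
  have main : ∀ fuel r l0 count checker, cs.length - r ≤ fuel → 1 ≤ r → l0 ≤ r → r ≤ l0 + 1 →
      dictInv checker cs l0 r → substrCountLoop cs 0 count (l0 : Int) checker r = count := by
    intro fuel
    induction fuel with
    | zero =>
      intro r l0 count checker hf hr hl hr2 hd
      rw [substrCountLoop, dif_neg (by omega)]
    | succ fuel ih =>
      intro r l0 count checker hf hr hl hr2 hd
      by_cases hrn : r < cs.length
      · rw [substrCountLoop, dif_pos hrn]
        dsimp only
        rw [List.getD_eq_getElem cs ' ' hrn]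
        have hd1 : dictInv (checker.insert cs[r] (checker.getD cs[r] 0 + 1)) cs l0 (r+1) :=
          insert_spec checker cs l0 r hl hrn hd
        rw [if_pos (show ((checker.insert cs[r] (checker.getD cs[r] 0 + 1)).size : Int) > 0 - 1 from by omega)]
        dsimp only
        have hd2 : dictInv (substrCountShrink (checker.insert cs[r] (checker.getD cs[r] 0 + 1))
            ((PySem.List.pyGet? cs ((l0 : Nat) : Int)).getD ' ')) cs (l0+1) (r+1) :=
          shrink_spec _ cs l0 (r+1) (by omega) (by omega) hd1
        by_cases hlr : l0 = r
        · rw [if_neg (show ¬ ((r : Int) - (((l0 : Nat) : Int) + 1) + 1 > 0) from by omega)]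
          dsimp only
          split_ifs with hC
          · exact absurd hC.1 (by omega)
          · rw [show (((l0 : Nat) : Int) + 1) = (((l0+1 : Nat)) : Int) from by push_cast; ring]
            exact ih (r+1) (l0+1) count _ (by omega) (by omega) (by omega) (by omega) hd2
        · rw [if_pos (show ((r : Int) - (((l0 : Nat) : Int) + 1) + 1 > 0) from by omega)]
          dsimp only
          rw [show (((l0 : Nat) : Int) + 1) = (((l0+1 : Nat)) : Int) from by push_cast; ring]
          have hd3 : dictInv (substrCountShrink (substrCountShrink
              (checker.insert cs[r] (checker.getD cs[r] 0 + 1))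
              ((PySem.List.pyGet? cs ((l0 : Nat) : Int)).getD ' '))
              ((PySem.List.pyGet? cs ((l0+1 : Nat) : Int)).getD ' ')) cs (l0+2) (r+1) :=
            shrink_spec _ cs (l0+1) (r+1) (by omega) (by omega) hd2
          split_ifs with hC
          · exact absurd hC.1 (by omega)
          · rw [show (((l0+1 : Nat) : Int) + 1) = (((l0+2 : Nat)) : Int) from by push_cast; ring]
            exact ih (r+1) (l0+2) count _ (by omega) (by omega) (by omega) (by omega) hd3
      · rw [substrCountLoop, dif_neg hrn]
  exact fun r l0 count checker hr hl hr2 hd => main cs.length r l0 count checker (by omega) hr hl hr2 hd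

-- ---- B's port as a countP ----
lemma pyRange_zero (m : Int) : PySem.List.pyRange 0 m = List.map (fun i : Nat => (i : Int)) (List.range m.toNat) := by
  unfold PySem.List.pyRange
  rw [if_neg (by norm_num)]
  by_cases hm : 0 < m
  · rw [if_pos (by norm_num), if_pos hm, show m - 0 + 1 - 1 = m from by ring, Int.ediv_one]
    show List.map (fun k : Nat => (0 : Int) + 1 * (k : Int)) (List.range m.toNat)
        = List.map (fun i : Nat => (i : Int)) (List.range m.toNat)
    apply List.map_congr_left
    intro a _
    ring
  · rw [if_pos (by norm_num), if_neg hm, show m.toNat = 0 from by omega]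
    rfl

-- for negative k the port never counts (the count test needs a dict size equal to k-1 < 0)
lemma loopNeg (cs : List Char) (k : Int) (hk : k < 0) : ∀ r (count left : Int) checker,
    substrCountLoop cs k count left checker r = count := by
  have main : ∀ fuel r (count left : Int) checker, cs.length - r ≤ fuel →
      substrCountLoop cs k count left checker r = count := by
    intro fuel
    induction fuel with
    | zero =>
      intro r count left checker hf
      rw [substrCountLoop, dif_neg (by omega)]
    | succ fuel ih =>
      intro r count left checker hf
      by_cases hrn : r < cs.length
      · rw [substrCountLoop, dif_pos hrn]
        dsimp only
        split_ifs
        all_goals try exact ih _ _ _ _ (by omega)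
        all_goals exact absurd ‹_ ∧ _›.1 (by omega)
      · rw [substrCountLoop, dif_neg hrn]
  exact fun r count left checker => main cs.length r count left checker (by omega)

lemma altB (s : String) (k : Int) (hk : 1 ≤ k) :
    substrCount_alt s k =
      ((List.range (s.toList.length + 1 - k.toNat)).countP (fun i => goodW s.toList k i) : Int) := by
  simp only [substrCount_alt]
  rw [if_neg (by omega), pyRange_zero, PySem.List.foldl_ite_add_one, List.countP_map, zero_add,
    show ((s.toList.length : Int) - k + 1).toNat = s.toList.length + 1 - k.toNat from by omega]
  congr 1
  apply List.countP_congr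
  intro i _
  simp only [Function.comp_apply]
  unfold goodW dct
  simp only [decide_eq_true_eq]
  have hsl : PySem.List.slice s.toList (some ((i : Nat) : Int)) (some (((i : Nat) : Int) + k))
      = (s.toList.drop i).take k.toNat := by
    rw [show (((i : Nat) : Int) + k) = (((i + k.toNat : Nat)) : Int) from by omega,
      PySem.List.slice_natCast, show i + k.toNat - i = k.toNat from by omega]
  rw [hsl]

-- ===== VERDICT (by name: the statement is the Claim_ definition above) =====
theorem substrCount_spec : Claim_equal_substrCount := by
  unfold Claim_equal_substrCount
  intro s k _ hpre
  unfold Spec_substrCount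
  obtain ⟨hs, hkor⟩ := hpre
  have hcs : s.toList ≠ [] := by
    intro h
    exact hs (String.toList_inj.mp (by rw [h]; rfl))
  obtain ⟨c0, rest, hcs0⟩ := List.exists_cons_of_ne_nil hcs
  by_cases hk1 : 1 ≤ k
  · rw [altB s k hk1]
    unfold substrCount
    rw [hcs0]
    dsimp only
    have hA := loopA (c0 :: rest) k hk1 1 0 0 (PySem.Dict.empty.insert c0 1) (by omega)
        ⟨by omega, by push_cast; omega, dictInv_init c0 rest,
          fun j hj => absurd hj (Nat.not_lt_zero j)⟩
    rw [show (((0 : Nat)) : Int) = (0 : Int) from by norm_num] at hA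
    rw [hA]
    have hb : remA (c0 :: rest) k 1
        = (List.range ((c0 :: rest).length + 1 - k.toNat)).countP
            (fun i => goodW (c0 :: rest) k i) := by
      unfold remA
      by_cases hk2 : 2 ≤ k
      · rw [show 1 + 1 - k.toNat = 0 from by omega, Nat.sub_zero, ← List.range_eq_range']
      · have hk1' : k = 1 := by omega
        subst hk1'
        rw [show (1 : Int).toNat = 1 from rfl, show 1 + 1 - 1 = 1 from rfl,
          show (c0 :: rest).length + 1 - 1 = (c0 :: rest).length from by omega]
        rw [List.range_eq_range',
          show (c0 :: rest).length = ((c0 :: rest).length - 1) + 1 from by simp,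
          List.range'_succ, List.countP_cons]
        have hg0 : goodW (c0 :: rest) 1 0 = false := by
          simp [goodW, dct, PySem.Set.ofList, PySem.Set.add, PySem.Set.contains]
        rw [hg0, show (0 + 1) = 1 from rfl]
        simp
    rw [hb]
    ring
  · -- k ≤ 0: B returns 0 at once; A's loop can never count (the dict size can never equal k-1 < 0)
    rw [show substrCount_alt s k = 0 from by simp only [substrCount_alt]; rw [if_pos (by omega)]]
    unfold substrCount
    rw [hcs0]
    dsimp only
    by_cases hk0 : k = 0
    · subst hk0
      have hA := loopK0 (c0 :: rest) 1 0 0 (PySem.Dict.empty.insert c0 1) (le_refl 1) (by omega)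
          (by omega) (dictInv_init c0 rest)
      rw [show (((0 : Nat)) : Int) = (0 : Int) from by norm_num] at hA
      rw [hA]
    · exact loopNeg (c0 :: rest) k (by omega) 1 0 0 _
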